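-- pv_equiv track=rewrite | github.com/jennirupponenkeuda/Python | osa07-02_erikoismerkit/src/erikoismerkit.py | jaa_merkkeihin
-- ===== SOURCE A (Python) =====
-- import string
--
-- def jaa_merkkeihin(merkkijono: str):
--     kirjaimet = string.ascii_letters
--     valimerkit = string.punctuation
--
--     kirjainjono = ""
--     valimerkitjono = ""
--     muutjono= ""
--
--     for merkki in merkkijono:
--         if merkki in kirjaimet:
--             kirjainjono += merkki
--         elif merkki in valimerkit:
--             valimerkitjono += merkki
--         else:
--             muutjono += merkki
--     return (kirjainjono, valimerkitjono,muutjono)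
-- ===== SOURCE B (Python) =====
-- import string
--
-- def jaa_merkkeihin(merkkijono: str):
--     kirjainjono = "".join(c for c in merkkijono if c in string.ascii_letters)
--     valimerkitjono = "".join(c for c in merkkijono if c in string.punctuation)
--     muutjono = "".join(c for c in merkkijono
--                        if c not in string.ascii_letters and c not in string.punctuation)
--     return (kirjainjono, valimerkitjono, muutjono)
-- ===== Notes on version B (the rewrite author's own statement) =====
-- stated objective: idiomatic
-- what changed: Replaces the single classifying if/elif/else pass with three accumulators by three independent filtering comprehensions (one scan per bucket) joined into the result strings.
import Mathlib
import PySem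

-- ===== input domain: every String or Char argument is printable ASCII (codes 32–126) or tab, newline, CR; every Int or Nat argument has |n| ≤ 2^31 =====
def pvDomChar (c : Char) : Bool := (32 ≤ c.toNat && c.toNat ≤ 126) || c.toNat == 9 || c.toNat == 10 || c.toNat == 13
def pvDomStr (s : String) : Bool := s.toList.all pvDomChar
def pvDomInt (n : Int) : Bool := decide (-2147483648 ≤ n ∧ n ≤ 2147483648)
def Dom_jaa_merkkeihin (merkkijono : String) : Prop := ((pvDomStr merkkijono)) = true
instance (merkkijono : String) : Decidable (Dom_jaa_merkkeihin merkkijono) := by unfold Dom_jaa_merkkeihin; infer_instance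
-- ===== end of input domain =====

-- B replaces A's single classifying if/elif/else pass by three independent filtering scans (idiomatic decomposition); same O(n) cost.
set_option maxRecDepth 10000


-- ===== PORT A =====
-- string.ascii_letters / string.punctuation, as literal constants
def pvKirjaimet : String := "abcdefghijklmnopqrstuvwxyzABCDEFGHIJKLMNOPQRSTUVWXYZ"
def pvValimerkit : String := "!\"#$%&'()*+,-./:;<=>?@[\\]^_`{|}~"

-- one pass, if/elif/else classification into three growing strings
def jaa_merkkeihin (merkkijono : String) : String × String × String :=
  merkkijono.toList.foldl
    (fun (st : String × String × String) merkki =>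
      if pvKirjaimet.toList.contains merkki then
        (st.1.push merkki, st.2.1, st.2.2)
      else if pvValimerkit.toList.contains merkki then
        (st.1, st.2.1.push merkki, st.2.2)
      else
        (st.1, st.2.1, st.2.2.push merkki))
    ("", "", "")

-- ===== PORT B =====
-- three independent filtering comprehensions, one per bucket
def jaa_merkkeihin_alt (merkkijono : String) : String × String × String :=
  (String.ofList (merkkijono.toList.filter (fun c => pvKirjaimet.toList.contains c)),
   String.ofList (merkkijono.toList.filter (fun c => pvValimerkit.toList.contains c)),
   String.ofList (merkkijono.toList.filter
     (fun c => !pvKirjaimet.toList.contains c && !pvValimerkit.toList.contains c)))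

-- ===== PRECONDITION & SPEC =====
def Spec_jaa_merkkeihin (merkkijono : String) (out : String × String × String) : Prop := out = jaa_merkkeihin_alt merkkijono
instance (merkkijono : String) (out : String × String × String) : Decidable (Spec_jaa_merkkeihin merkkijono out) := by unfold Spec_jaa_merkkeihin; infer_instance

-- ===== CLAIM (what is proved, stated in full; the proofs are below) =====
def Claim_equal_jaa_merkkeihin : Prop := ∀ (merkkijono : String), Dom_jaa_merkkeihin merkkijono → Spec_jaa_merkkeihin merkkijono (jaa_merkkeihin merkkijono)

-- ===== LEMMAS AND PROOFS =====

theorem pv_disj_bool : (pvKirjaimet.toList.all fun c => !(pvValimerkit.toList.contains c)) = true := by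
  decide

theorem pv_disj : ∀ c ∈ pvKirjaimet.toList, pvValimerkit.toList.contains c = false := by
  intro c hc
  simpa using List.all_eq_true.mp pv_disj_bool c hc

theorem pv_ofList_push (l : List Char) (c : Char) :
    (String.ofList l).push c = String.ofList (l ++ [c]) := by
  apply String.toList_injective; simp

theorem pv_fold_eq (l ka va ma : List Char) :
    l.foldl
      (fun (st : String × String × String) merkki =>
        if pvKirjaimet.toList.contains merkki then
          (st.1.push merkki, st.2.1, st.2.2)
        else if pvValimerkit.toList.contains merkki then
          (st.1, st.2.1.push merkki, st.2.2)
        else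
          (st.1, st.2.1, st.2.2.push merkki))
      (String.ofList ka, String.ofList va, String.ofList ma)
    = (String.ofList (ka ++ l.filter (fun c => pvKirjaimet.toList.contains c)),
       String.ofList (va ++ l.filter (fun c => pvValimerkit.toList.contains c)),
       String.ofList (ma ++ l.filter
         (fun c => !pvKirjaimet.toList.contains c && !pvValimerkit.toList.contains c))) := by
  induction l generalizing ka va ma with
  | nil => simp
  | cons c t ih =>
    simp only [List.foldl_cons, List.filter_cons]
    by_cases hk : pvKirjaimet.toList.contains c = true
    · have hv := pv_disj c (by simpa using hk)
      rw [if_pos hk, if_pos hk, if_neg (by simp_all), if_neg (by simp_all),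
        pv_ofList_push, ih]
      simp
    · by_cases hv : pvValimerkit.toList.contains c = true
      · rw [if_neg (by simp_all), if_pos hv, if_neg (by simp_all), if_pos hv,
          if_neg (by simp_all), pv_ofList_push, ih]
        simp
      · rw [if_neg (by simp_all), if_neg (by simp_all), if_neg (by simp_all),
          if_neg (by simp_all), if_pos (by simp_all), pv_ofList_push, ih]
        simp

-- ===== VERDICT (by name: the statement is the Claim_ definition above) =====
theorem jaa_merkkeihin_spec : Claim_equal_jaa_merkkeihin := by
  intro s _
  show jaa_merkkeihin s = jaa_merkkeihin_alt s
  unfold jaa_merkkeihin jaa_merkkeihin_alt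
  simpa using pv_fold_eq s.toList [] [] []
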